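-- pv_equiv track=rewrite | github.com/schomper/jasper | 7_new_document/utils.py | remove_digits
-- ===== SOURCE A (Python) =====
-- def remove_digits(line):
--     """ (str) -> str
--
--     Return passed in string without any digits in it
--     """
--     digitless = []
--     tokens = list(line)
--
--     for token in tokens:
--         if not token.isdigit():
--             digitless.append(token)
--
--     line = ''.join(digitless)
--
--     digitless = []
--     tokens = line.split(' ')
--     for token in tokens:
--         if token != '':
--             digitless.append(token)
--
--     return ' '.join(digitless)
-- ===== SOURCE B (Python) =====
-- def remove_digits(line):
--     """ (str) -> str
--
--     Return passed in string without any digits in it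
--     """
--     out = []
--     pending = False
--     for ch in line:
--         if ch.isdigit():
--             continue
--         if ch == ' ':
--             pending = True
--         else:
--             if pending and out:
--                 out.append(' ')
--             pending = False
--             out.append(ch)
--     return ''.join(out)
-- ===== Notes on version B (the rewrite author's own statement) =====
-- stated objective: simpler
-- what changed: B replaces A's multi-pass pipeline (filter chars into a list, join, split on space, filter empties, rejoin) by one pass over the characters with a pending-space flag that drops digits and collapses/trims spaces on the fly.
import Mathlib
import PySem

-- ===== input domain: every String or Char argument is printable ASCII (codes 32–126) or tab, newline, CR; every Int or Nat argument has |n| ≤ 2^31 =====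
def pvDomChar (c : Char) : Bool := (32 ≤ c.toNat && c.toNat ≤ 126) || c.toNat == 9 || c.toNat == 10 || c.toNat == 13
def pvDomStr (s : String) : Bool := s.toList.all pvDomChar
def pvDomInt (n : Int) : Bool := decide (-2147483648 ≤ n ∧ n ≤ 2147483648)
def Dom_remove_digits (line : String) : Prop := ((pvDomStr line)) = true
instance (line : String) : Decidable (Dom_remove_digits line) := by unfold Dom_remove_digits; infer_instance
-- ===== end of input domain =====

-- B is one pass with a pending-space flag instead of A's filter/join/split/filter/join pipeline (same result, simpler).

-- ===== PORT A =====
def remove_digits (line : String) : String :=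
  -- first loop: keep the non-digit characters
  let digitless := line.toList.foldl
    (fun acc t => if !PySem.Chars.isdigit t then acc ++ [t] else acc) ([] : List Char)
  -- line = ''.join(digitless)
  let line2 := PySem.Chars.join [] (digitless.map (fun c => [c]))
  -- tokens = line.split(' ')
  let tokens := PySem.Chars.splitOn line2 [' ']
  -- second loop: keep the non-empty tokens
  let digitless2 := tokens.foldl
    (fun acc t => if t ≠ [] then acc ++ [t] else acc) ([] : List (List Char))
  -- return ' '.join(digitless2)
  String.ofList (PySem.Chars.join [' '] digitless2)

-- ===== PORT B =====
-- the body of B's single for-loop (state = (out, pending_space))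
def pvStep (s : List Char × Bool) (ch : Char) : List Char × Bool :=
  if PySem.Chars.isdigit ch then s
  else if ch = ' ' then (s.1, true)
  else ((if s.2 && !s.1.isEmpty then s.1 ++ [' '] else s.1) ++ [ch], false)

def remove_digits_alt (line : String) : String :=
  String.ofList (line.toList.foldl pvStep (([] : List Char), false)).1

-- ===== PRECONDITION & SPEC =====
def Spec_remove_digits (line : String) (out : String) : Prop := out = remove_digits_alt line
instance (line : String) (out : String) : Decidable (Spec_remove_digits line out) := by unfold Spec_remove_digits; infer_instance

-- ===== CLAIM (what is proved, stated in full; the proofs are below) =====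
def Claim_equal_remove_digits : Prop := ∀ (line : String), Dom_remove_digits line → Spec_remove_digits line (remove_digits line)

-- ===== LEMMAS AND PROOFS =====

-- split(' ') as a structural recursion: (first token, remaining tokens)
def pvSp (c : Char) : List Char → List Char × List (List Char)
  | [] => ([], [])
  | d :: r =>
    let p := pvSp c r
    if d = c then ([], p.1 :: p.2) else (d :: p.1, p.2)

-- the collapsed tail a single pass appends once output is non-empty (p = pending space)
def pvG : Bool → List Char → List Char
  | _, [] => []
  | p, c :: r => if c = ' ' then pvG true r else (if p then ' ' :: c :: pvG false r else c :: pvG false r)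

-- the whole collapsed string (leading spaces dropped)
def pvH : List Char → List Char
  | [] => []
  | c :: r => if c = ' ' then pvH r else c :: pvG false r

lemma pvSp_go (c : Char) : ∀ (fuel : Nat) (l cur : List Char) (acc : List (List Char)),
    l.length < fuel →
    PySem.Chars.splitOn.go [c] fuel l cur acc
      = acc.reverse ++ (cur.reverse ++ (pvSp c l).1) :: (pvSp c l).2 := by
  intro fuel
  induction fuel with
  | zero => intro l cur acc h; omega
  | succ n ih =>
    intro l cur acc h
    cases l with
    | nil => simp [PySem.Chars.splitOn.go, pvSp]
    | cons d r =>
      by_cases hd : d = c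
      · subst hd
        have hpre : [d].isPrefixOf (d :: r) = true := by simp [List.isPrefixOf]
        rw [PySem.Chars.splitOn.go]
        simp only [hpre, if_pos]
        rw [show PySem.Chars.splitOn.go [d] n (List.drop [d].length (d :: r)) [] (cur.reverse :: acc)
              = PySem.Chars.splitOn.go [d] n r [] (cur.reverse :: acc) from rfl]
        rw [ih r [] (cur.reverse :: acc) (by simpa using Nat.lt_of_succ_lt_succ h)]
        simp [pvSp]
      · have hpre : [c].isPrefixOf (d :: r) = false := by
          simp [List.isPrefixOf]
          exact fun h' => absurd h'.symm hd
        rw [PySem.Chars.splitOn.go]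
        simp only [hpre, Bool.false_eq_true, if_false]
        rw [ih r (d :: cur) acc (by simpa using Nat.lt_of_succ_lt_succ h)]
        simp [pvSp, hd]

lemma pvSplitOn_eq (c : Char) (l : List Char) :
    PySem.Chars.splitOn l [c] = (pvSp c l).1 :: (pvSp c l).2 := by
  unfold PySem.Chars.splitOn
  rw [pvSp_go c (l.length + 1) l [] [] (by omega)]
  simp

lemma pvG_true (r : List Char) : pvG true r = if pvH r = [] then [] else ' ' :: pvH r := by
  induction r with
  | nil => simp [pvG, pvH]
  | cons c r ih =>
    by_cases hc : c = ' '
    · simp [pvG, pvH, hc, ih]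
    · simp [pvG, pvH, hc]

lemma pvJoin_cons (x : List Char) (xs : List (List Char)) :
    PySem.Chars.join [' '] (x :: xs)
      = x ++ (if xs = [] then [] else ' ' :: PySem.Chars.join [' '] xs) := by
  cases xs with
  | nil => simp [PySem.Chars.join, List.intercalate]
  | cons y ys => simp [PySem.Chars.join, List.intercalate, List.intersperse]

lemma pvJoin_ne_nil (xs : List (List Char)) (hne : xs ≠ []) (h : ∀ x ∈ xs, x ≠ []) :
    PySem.Chars.join [' '] xs ≠ [] := by
  cases xs with
  | nil => exact absurd rfl hne
  | cons x ys =>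
    rw [pvJoin_cons]
    have hx := h x (by simp)
    cases x with
    | nil => exact absurd rfl hx
    | cons a as => simp

-- A's pipeline after the split, with a word prefix cur already accumulated
lemma pvA_main : ∀ (l cur : List Char),
    PySem.Chars.join [' ']
      (((cur ++ (pvSp ' ' l).1) :: (pvSp ' ' l).2).filter (fun t => decide (t ≠ [])))
      = if cur = [] then pvH l else cur ++ pvG false l := by
  intro l
  induction l with
  | nil =>
    intro cur
    cases cur with
    | nil => simp [pvSp, pvH, PySem.Chars.join, List.intercalate]
    | cons a as =>
      simp [pvSp, pvG, PySem.Chars.join, List.intercalate, List.filter]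
  | cons d r ih =>
    intro cur
    by_cases hd : d = ' '
    · subst hd
      have hsp1 : (pvSp ' ' (' ' :: r)).1 = [] := by simp [pvSp]
      have hsp2 : (pvSp ' ' (' ' :: r)).2 = (pvSp ' ' r).1 :: (pvSp ' ' r).2 := by simp [pvSp]
      rw [hsp1, hsp2, List.append_nil]
      have hih := ih []
      rw [List.nil_append, if_pos rfl] at hih
      cases cur with
      | nil =>
        rw [if_pos rfl]
        rw [show pvH (' ' :: r) = pvH r by simp [pvH]]
        rw [show List.filter (fun t => decide (t ≠ [])) ([] :: (pvSp ' ' r).1 :: (pvSp ' ' r).2)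
              = List.filter (fun t => decide (t ≠ [])) ((pvSp ' ' r).1 :: (pvSp ' ' r).2) by simp]
        exact hih
      | cons a as =>
        rw [if_neg (by simp)]
        rw [show ((a :: as) :: (pvSp ' ' r).1 :: (pvSp ' ' r).2).filter (fun t => decide (t ≠ []))
              = (a :: as) :: (((pvSp ' ' r).1 :: (pvSp ' ' r).2).filter (fun t => decide (t ≠ []))) by
            simp [List.filter]]
        rw [pvJoin_cons]
        rw [show pvG false (' ' :: r) = pvG true r by simp [pvG]]
        congr 1
        rw [pvG_true]
        by_cases hf : (((pvSp ' ' r).1 :: (pvSp ' ' r).2).filter (fun t => decide (t ≠ []))) = ([] : List (List Char))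
        · rw [if_pos hf]
          rw [hf] at hih
          have h0 : pvH r = [] := by
            rw [← hih]; simp [PySem.Chars.join, List.intercalate]
          rw [if_pos h0]
        · rw [if_neg hf, hih]
          have hne : pvH r ≠ [] := by
            rw [← hih]
            apply pvJoin_ne_nil _ hf
            intro x hx
            have := List.of_mem_filter hx
            simpa using this
          rw [if_neg hne]
    · have hsp1 : (pvSp ' ' (d :: r)).1 = d :: (pvSp ' ' r).1 := by simp [pvSp, hd]
      have hsp2 : (pvSp ' ' (d :: r)).2 = (pvSp ' ' r).2 := by simp [pvSp, hd]
      rw [hsp1, hsp2]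
      have hih := ih (cur ++ [d])
      rw [if_neg (by simp)] at hih
      rw [show cur ++ d :: (pvSp ' ' r).1 = (cur ++ [d]) ++ (pvSp ' ' r).1 by simp]
      rw [hih]
      cases cur with
      | nil => simp [pvH, hd]
      | cons a as => simp [pvG, hd]

-- B's loop never changes state on a digit
lemma pvB_skip_digits (l : List Char) : ∀ (s : List Char × Bool),
    l.foldl pvStep s = (l.filter (fun c => !PySem.Chars.isdigit c)).foldl pvStep s := by
  induction l with
  | nil => intro s; rfl
  | cons c l ih =>
    intro s
    rw [List.filter_cons, List.foldl_cons]
    by_cases hc : PySem.Chars.isdigit c = true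
    · have hstep : pvStep s c = s := by simp [pvStep, hc]
      rw [hstep, hc]
      simpa using ih s
    · rw [Bool.not_eq_true] at hc
      rw [hc]
      simp only [Bool.not_false, if_pos]
      rw [List.foldl_cons]
      exact ih (pvStep s c)

-- B's loop on a digit-free list computes pvH / append pvG
lemma pvB_main : ∀ (l : List Char), (∀ c ∈ l, PySem.Chars.isdigit c = false) →
    ∀ (out : List Char) (p : Bool),
    (l.foldl pvStep (out, p)).1 = if out = [] then pvH l else out ++ pvG p l := by
  intro l
  induction l with
  | nil =>
    intro _ out p
    cases out <;> simp [pvH, pvG]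
  | cons c r ih =>
    intro hnd out p
    have hc : PySem.Chars.isdigit c = false := hnd c (by simp)
    have hr : ∀ x ∈ r, PySem.Chars.isdigit x = false := fun x hx => hnd x (by simp [hx])
    by_cases hsp : c = ' '
    · subst hsp
      rw [List.foldl_cons]
      rw [show pvStep (out, p) ' ' = (out, true) by simp [pvStep, hc]]
      rw [ih hr out true]
      cases out with
      | nil => simp [pvH]
      | cons a as => simp [pvG]
    · rw [List.foldl_cons]
      rw [show pvStep (out, p) c
            = ((if p && !out.isEmpty then out ++ [' '] else out) ++ [c], false) by
          simp [pvStep, hc, hsp]]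
      cases out with
      | nil =>
        rw [show ((if p && !([] : List Char).isEmpty then [] ++ [' '] else []) ++ [c]) = [c] by
            cases p <;> simp]
        rw [ih hr [c] false]
        simp [pvH, hsp]
      | cons a as =>
        rw [ih hr _ false]
        rw [if_neg (by cases p <;> simp)]
        cases p <;> simp [pvG, hsp]

-- main list-level equality
lemma pvMain (s : String) : remove_digits s = remove_digits_alt s := by
  unfold remove_digits remove_digits_alt
  dsimp only
  rw [PySem.List.foldl_append_if_eq_filter (fun c => !PySem.Chars.isdigit c) s.toList []]
  rw [List.nil_append]
  rw [show PySem.Chars.join [] ((List.filter (fun c => !PySem.Chars.isdigit c) s.toList).map (fun c => [c]))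
        = List.filter (fun c => !PySem.Chars.isdigit c) s.toList from
      PySem.Chars.join_nil_singletons _]
  rw [pvSplitOn_eq]
  rw [PySem.List.foldl_append_ite_eq_filter (fun t => t ≠ []) _ []]
  rw [List.nil_append]
  rw [pvB_skip_digits]
  rw [pvB_main (s.toList.filter (fun c => !PySem.Chars.isdigit c))
        (by intro c hc; have := List.of_mem_filter hc; simpa using this) [] false]
  rw [if_pos rfl]
  have := pvA_main (s.toList.filter (fun c => !PySem.Chars.isdigit c)) []
  rw [List.nil_append, if_pos rfl] at this
  rw [this]

-- ===== VERDICT (by name: the statement is the Claim_ definition above) =====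
theorem remove_digits_spec : Claim_equal_remove_digits := by
  intro line _
  exact pvMain line
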